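-- pv_equiv track=rewrite | github.com/suicao/coleridge-gpt | code/utils.py | is_valid_pred
-- ===== SOURCE A (Python) =====
-- bl_words = [" are ", " is ", " was ", " were "]
--
-- def is_valid_pred(x):
--     if "." in x or "!" in x or "?" in x or (not x.split()[0].isalpha()):
--         return False
--     x = f" {x} "
--     for w in bl_words:
--         if w in x:
--             return False
--     return True
-- ===== SOURCE B (Python) =====
-- bl_words = {"are", "is", "was", "were"}
--
-- def is_valid_pred(x):
--     if not x.split()[0].isalpha():
--         return False
--     token = ""
--     for c in x + " ":
--         if c == " ":
--             if token in bl_words: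
--                 return False
--             token = ""
--         elif c in ".!?":
--             return False
--         else:
--             token += c
--     return True
-- ===== Notes on version B (the rewrite author's own statement) =====
-- stated objective: alternative
-- what changed: Replaces A's seven independent substring scans (three punctuation 'in' tests plus a padded ' w ' scan per blacklist word) with a single left-to-right pass that accumulates the current space-delimited token and rejects on a punctuation character or a blacklisted token.
import Mathlib
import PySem

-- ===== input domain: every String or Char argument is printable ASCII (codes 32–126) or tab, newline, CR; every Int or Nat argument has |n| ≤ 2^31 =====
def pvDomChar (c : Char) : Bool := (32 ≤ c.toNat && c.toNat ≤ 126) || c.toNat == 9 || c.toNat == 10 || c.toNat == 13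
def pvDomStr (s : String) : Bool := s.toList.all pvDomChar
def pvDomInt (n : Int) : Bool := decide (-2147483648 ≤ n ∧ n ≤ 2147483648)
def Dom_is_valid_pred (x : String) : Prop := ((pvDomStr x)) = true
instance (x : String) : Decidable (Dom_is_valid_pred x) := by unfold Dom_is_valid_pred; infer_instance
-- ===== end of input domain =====

-- B replaces A's seven substring scans with one left-to-right token-accumulating pass (same return value).

-- ===== PORT A =====
-- bl_words = [" are ", " is ", " was ", " were "]
def pvBlWords : List (List Char) :=
  [[' ','a','r','e',' '], [' ','i','s',' '], [' ','w','a','s',' '], [' ','w','e','r','e',' ']]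

def is_valid_pred (x : String) : Bool :=
  -- x.split()[0] raises IndexError when x.split() == []; excluded by Pre_ (headD is only a totaliser)
  if PySem.Chars.isIn ['.'] x.toList || PySem.Chars.isIn ['!'] x.toList || PySem.Chars.isIn ['?'] x.toList
      || !(PySem.Str.strIsalpha ((PySem.Str.split₀ x).headD "")) then
    false
  else
    -- x = f" {x} "; for w in bl_words: if w in x: return False;  return True
    !(pvBlWords.any (fun w => PySem.Chars.isIn w (' ' :: x.toList ++ [' '])))

-- ===== PORT B =====
def pvBlSet : List (List Char) := [['a','r','e'], ['i','s'], ['w','a','s'], ['w','e','r','e']]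

-- the for-loop of Source B: state = current token, remaining characters of x + " "
def pvScan : List Char → List Char → Bool
  | _tok, [] => true
  | tok, c :: rest =>
    if c = ' ' then
      if pvBlSet.contains tok then false else pvScan [] rest
    else if c = '.' || c = '!' || c = '?' then false
    else pvScan (tok ++ [c]) rest

def is_valid_pred_alt (x : String) : Bool :=
  if !(PySem.Str.strIsalpha ((PySem.Str.split₀ x).headD "")) then false
  else pvScan [] (x.toList ++ [' '])

-- ===== PRECONDITION & SPEC =====
-- Pre_ excludes exactly the whitespace-only strings (x.split() == []), on which both A and B raise IndexError.
def Pre_is_valid_pred (x : String) : Prop := PySem.Str.split₀ x ≠ []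
instance (x : String) : Decidable (Pre_is_valid_pred x) := by unfold Pre_is_valid_pred; infer_instance
def pvWitness_is_valid_pred : String := "hello world"

def Spec_is_valid_pred (x : String) (out : Bool) : Prop := out = is_valid_pred_alt x
instance (x : String) (out : Bool) : Decidable (Spec_is_valid_pred x out) := by unfold Spec_is_valid_pred; infer_instance

-- ===== CLAIM (what is proved, stated in full; the proofs are below) =====
def Claim_equal_is_valid_pred : Prop := ∀ (x : String), Dom_is_valid_pred x → Pre_is_valid_pred x → Spec_is_valid_pred x (is_valid_pred x)

-- ===== LEMMAS AND PROOFS =====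

-- a one-character substring test is membership
lemma pv_singleton_infix {α : Type} (a : α) (l : List α) : [a] <:+: l ↔ a ∈ l := by
  constructor
  · intro h; exact h.mem List.mem_cons_self
  · intro h
    rcases List.append_of_mem h with ⟨u, v, rfl⟩
    exact ⟨u, v, by simp⟩

lemma pv_isIn_eq_decide (sub s : List Char) :
    PySem.Chars.isIn sub s = decide (sub <:+: s) := by
  by_cases h : sub <:+: s
  · rw [decide_eq_true h]; exact (PySem.Chars.isIn_iff_infix sub s).mpr h
  · rw [decide_eq_false h, Bool.eq_false_iff]
    intro hc
    exact h ((PySem.Chars.isIn_iff_infix sub s).mp hc)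

-- w ++ " " is a prefix of tok ++ " " ++ r (both w, tok space-free) exactly when w = tok
lemma pv_prefix_tok (w : List Char) : ∀ (tok r : List Char), ' ' ∉ w → ' ' ∉ tok →
    ((w ++ [' ']) <+: (tok ++ ' ' :: r) ↔ w = tok) := by
  induction w with
  | nil =>
    intro tok r _ htok
    cases tok with
    | nil => simp
    | cons b t =>
      constructor
      · intro h
        have : (' ' : Char) = b := (List.cons_prefix_cons.mp h).1
        exact absurd (this ▸ List.mem_cons_self) htok
      · intro h; exact absurd h (by simp)
  | cons a w' ih =>
    intro tok r hw htok
    cases tok with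
    | nil =>
      constructor
      · intro h
        have : a = ' ' := (List.cons_prefix_cons.mp h).1
        exact absurd (this ▸ List.mem_cons_self) hw
      · intro h; exact absurd h (by simp)
    | cons b t =>
      rw [List.cons_append, List.cons_append, List.cons_prefix_cons,
        ih t r (fun h => hw (List.mem_cons_of_mem _ h)) (fun h => htok (List.mem_cons_of_mem _ h))]
      constructor
      · rintro ⟨rfl, rfl⟩; rfl
      · rintro h; injection h with h1 h2; exact ⟨h1, h2⟩

-- a pattern starting with a space cannot start inside a space-free block
lemma pv_infix_skip (p : List Char) : ∀ (tok l : List Char), ' ' ∉ tok →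
    ((' ' :: p) <:+: (tok ++ l) ↔ (' ' :: p) <:+: l) := by
  intro tok
  induction tok with
  | nil => intro l _; simp
  | cons b t ih =>
    intro l htok
    rw [List.cons_append, List.infix_cons_iff, ih l (fun h => htok (List.mem_cons_of_mem _ h))]
    constructor
    · rintro (h | h)
      · have : (' ' : Char) = b := (List.cons_prefix_cons.mp h).1
        exact absurd (this ▸ List.mem_cons_self) htok
      · exact h
    · exact Or.inr

lemma pv_infix_split (w tok r : List Char) (hw : ' ' ∉ w) (htok : ' ' ∉ tok) :
    ((' ' :: w ++ [' ']) <:+: (' ' :: tok ++ ' ' :: r) ↔ (w = tok ∨ (' ' :: w ++ [' ']) <:+: (' ' :: r))) := by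
  rw [List.cons_append, List.cons_append, List.infix_cons_iff, List.cons_prefix_cons,
    pv_infix_skip (w ++ [' ']) tok (' ' :: r) htok]
  constructor
  · rintro (⟨-, h⟩ | h)
    · exact Or.inl ((pv_prefix_tok w tok r hw htok).mp h)
    · exact Or.inr h
  · rintro (rfl | h)
    · exact Or.inl ⟨rfl, (pv_prefix_tok w w r hw hw).mpr rfl⟩
    · exact Or.inr h

-- List.any respects pointwise-on-members equality
lemma pv_any_congr_mem {α : Type} {l : List α} {f g : α → Bool}
    (h : ∀ a ∈ l, f a = g a) : l.any f = l.any g := by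
  induction l with
  | nil => rfl
  | cons a t ih =>
    simp only [List.any_cons, h a List.mem_cons_self,
      ih (fun b hb => h b (List.mem_cons_of_mem _ hb))]

-- the core invariant of B's single pass, against A's padded-substring conditions
lemma pv_scan_eq (s : List Char) : ∀ (tok : List Char), ' ' ∉ tok →
    pvScan tok (s ++ [' ']) =
      (!(s.any (fun c => c = '.' || c = '!' || c = '?')) &&
       !(pvBlSet.any (fun w => decide ((' ' :: w ++ [' ']) <:+: (' ' :: (tok ++ s) ++ [' ']))))) := by
  induction s with
  | nil =>
    intro tok htok
    have hsplit : ∀ w : List Char, ' ' ∉ w →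
        ((' ' :: w ++ [' ']) <:+: (' ' :: tok ++ [' ']) ↔ w = tok) := by
      intro w hw
      have h := pv_infix_split w tok [] hw htok
      rw [show (' ' :: tok ++ ' ' :: ([] : List Char)) = ' ' :: tok ++ [' '] from rfl] at h
      rw [h]
      constructor
      · rintro (h1 | h1)
        · exact h1
        · exact absurd (List.IsInfix.length_le h1) (by simp)
      · exact Or.inl
    show (if pvBlSet.contains tok then false else pvScan [] []) = _
    simp only [List.append_nil, List.any_nil, Bool.not_false, Bool.true_and]
    by_cases hc : pvBlSet.contains tok = true
    · rw [if_pos hc]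
      rcases List.contains_iff_exists_mem_beq.mp hc with ⟨w, hwm, hbeq⟩
      have hwt : w = tok := (beq_iff_eq.mp hbeq).symm
      have hwsp : (' ' : Char) ∉ w := by fin_cases hwm <;> simp
      symm
      simp only [Bool.not_eq_false', List.any_eq_true]
      exact ⟨w, hwm, by rw [decide_eq_true_eq, hsplit w hwsp]; exact hwt⟩
    · rw [if_neg hc]
      show pvScan [] [] = _
      symm
      simp only [pvScan, Bool.not_eq_true', List.any_eq_false]
      intro w hwm
      have hwsp : (' ' : Char) ∉ w := by fin_cases hwm <;> simp
      rw [decide_eq_true_eq, hsplit w hwsp]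
      intro heq
      exact hc (List.contains_iff_exists_mem_beq.mpr ⟨w, hwm, beq_iff_eq.mpr heq.symm⟩)
  | cons c t ih =>
    intro tok htok
    rw [List.cons_append]
    by_cases hsp : c = ' '
    · subst hsp
      show (if (' ' : Char) = ' ' then (if pvBlSet.contains tok then false else pvScan [] (t ++ [' '])) else _) = _
      rw [if_pos rfl]
      have hpad : (' ' :: (tok ++ ' ' :: t) ++ [' '] : List Char) = ' ' :: tok ++ ' ' :: (t ++ [' ']) := by simp
      by_cases hc : pvBlSet.contains tok = true
      · rw [if_pos hc]
        rcases List.contains_iff_exists_mem_beq.mp hc with ⟨w, hwm, hbeq⟩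
        have hwt : w = tok := (beq_iff_eq.mp hbeq).symm
        have hwsp : (' ' : Char) ∉ w := by fin_cases hwm <;> simp
        symm
        rw [Bool.and_eq_false_iff]
        right
        simp only [Bool.not_eq_false', List.any_eq_true]
        refine ⟨w, hwm, ?_⟩
        rw [decide_eq_true_eq, hpad, pv_infix_split w tok (t ++ [' ']) hwsp htok]
        exact Or.inl hwt
      · rw [if_neg hc, ih [] (by simp)]
        have harg : ∀ w ∈ pvBlSet,
            (decide ((' ' :: w ++ [' ']) <:+: (' ' :: ([] ++ t) ++ [' ']))) =
            (decide ((' ' :: w ++ [' ']) <:+: (' ' :: (tok ++ ' ' :: t) ++ [' ']))) := by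
          intro w hwm
          have hwsp : (' ' : Char) ∉ w := by fin_cases hwm <;> simp
          rw [hpad]
          simp only [List.nil_append]
          rw [decide_eq_decide, pv_infix_split w tok (t ++ [' ']) hwsp htok]
          constructor
          · intro h
            exact Or.inr (by simpa using h)
          · rintro (rfl | h)
            · exact absurd (List.contains_iff_exists_mem_beq.mpr ⟨w, hwm, by simp⟩) hc
            · simpa using h
        rw [pv_any_congr_mem harg]
        simp
    · show (if c = ' ' then _ else if c = '.' || c = '!' || c = '?' then false else pvScan (tok ++ [c]) (t ++ [' '])) = _
      rw [if_neg hsp]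
      by_cases hp : (c = '.' || c = '!' || c = '?') = true
      · rw [if_pos hp]
        symm
        rw [Bool.and_eq_false_iff]
        left
        simp only [Bool.not_eq_false', List.any_cons]
        simp [hp]
      · rw [if_neg hp, ih (tok ++ [c]) (by
          intro hmem
          rcases List.mem_append.mp hmem with h | h
          · exact htok h
          · simp at h; exact hsp h.symm)]
        rw [show (tok ++ [c] ++ t : List Char) = tok ++ c :: t by simp]
        have hp' : (decide (c = '.') || decide (c = '!') || decide (c = '?')) = false := by
          simpa using hp
        simp [List.any_cons, hp']

-- ===== VERDICT (by name: the statement is the Claim_ definition above) =====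
theorem is_valid_pred_spec : Claim_equal_is_valid_pred := by
  unfold Claim_equal_is_valid_pred
  intro x _hdom _hpre
  unfold Spec_is_valid_pred is_valid_pred is_valid_pred_alt
  by_cases halpha : PySem.Str.strIsalpha ((PySem.Str.split₀ x).headD "") = true
  · rw [halpha]
    simp only [Bool.not_true, Bool.or_false]
    have hscan := pv_scan_eq x.toList [] (by simp)
    simp only [List.nil_append] at hscan
    rw [if_neg (Bool.false_ne_true), hscan]
    by_cases hp : (x.toList.any (fun c => c = '.' || c = '!' || c = '?')) = true
    · have hmem : (PySem.Chars.isIn ['.'] x.toList || PySem.Chars.isIn ['!'] x.toList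
          || PySem.Chars.isIn ['?'] x.toList) = true := by
        simp only [List.any_eq_true, Bool.or_eq_true, decide_eq_true_eq] at hp
        rcases hp with ⟨c, hc, hcp⟩
        rw [pv_isIn_eq_decide, pv_isIn_eq_decide, pv_isIn_eq_decide]
        simp only [Bool.or_eq_true, decide_eq_true_eq, pv_singleton_infix]
        rcases hcp with (rfl | rfl) | rfl
        · exact Or.inl (Or.inl hc)
        · exact Or.inl (Or.inr hc)
        · exact Or.inr hc
      rw [hmem]
      simp [hp]
    · replace hp := Bool.eq_false_iff.mpr hp
      have hp' := List.any_eq_false.mp hp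
      have hmem : (PySem.Chars.isIn ['.'] x.toList || PySem.Chars.isIn ['!'] x.toList
          || PySem.Chars.isIn ['?'] x.toList) = false := by
        rw [pv_isIn_eq_decide, pv_isIn_eq_decide, pv_isIn_eq_decide]
        simp only [Bool.or_eq_false_iff, decide_eq_false_iff_not, pv_singleton_infix]
        refine ⟨⟨fun h => ?_, fun h => ?_⟩, fun h => ?_⟩ <;>
          · have := hp' _ h; simp at this
      rw [hmem, if_neg Bool.false_ne_true, hp]
      simp only [Bool.not_false, Bool.true_and]
      simp only [pvBlWords, pvBlSet, List.any_cons, List.any_nil, pv_isIn_eq_decide]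
      rfl
  · replace halpha := Bool.eq_false_iff.mpr halpha
    rw [halpha]
    simp
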